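-- pv_equiv track=rewrite | github.com/maeste/tolc-puzzle | exercises/word_modeler.py | _numeric_distractors
-- ===== SOURCE A (Python) =====
-- def _numeric_distractors(correct, offsets=None):
--     """Generate 4 distinct numeric distractors around *correct* (int).
--
--     *offsets*, if given, must be a list of 4 non-zero integers.
--     Otherwise reasonable defaults are computed.
--     All returned values are stringified integers, guaranteed distinct
--     from *correct* and from each other.
--     """
--     if offsets is None:
--         offsets = [-2, -1, 1, 2]
--     candidates = []
--     for o in offsets:
--         v = correct + o
--         if v != correct and v not in candidates:
--             candidates.append(v)
--     # fill up to 4 if collisions removed some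
--     extra = 3
--     while len(candidates) < 4:
--         extra += 1
--         v = correct + extra
--         if v != correct and v not in candidates:
--             candidates.append(v)
--     return [str(c) for c in candidates[:4]]
-- ===== SOURCE B (Python) =====
-- def _numeric_distractors(correct, offsets=None):
--     """Work on the offsets themselves: dedup the non-zero offsets once, build the
--     top-up values by filtering a bounded range, then truncate and stringify."""
--     if offsets is None:
--         offsets = [-2, -1, 1, 2]
--     kept = list(dict.fromkeys(o for o in offsets if o != 0))
--     fill = [x for x in range(4, 8 + len(kept)) if x not in kept]
--     return [str(correct + o) for o in (kept + fill)[:4]]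
-- ===== Notes on version B (the rewrite author's own statement) =====
-- stated objective: simpler
-- what changed: B works on the offsets instead of the candidate values: an ordered dict.fromkeys dedup of the non-zero offsets replaces A's append-with-membership loop, the while top-up loop is replaced by filtering the bounded range(4, 8+len(kept)) against the kept offsets, and one final slice-and-map produces the strings.
import Mathlib
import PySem

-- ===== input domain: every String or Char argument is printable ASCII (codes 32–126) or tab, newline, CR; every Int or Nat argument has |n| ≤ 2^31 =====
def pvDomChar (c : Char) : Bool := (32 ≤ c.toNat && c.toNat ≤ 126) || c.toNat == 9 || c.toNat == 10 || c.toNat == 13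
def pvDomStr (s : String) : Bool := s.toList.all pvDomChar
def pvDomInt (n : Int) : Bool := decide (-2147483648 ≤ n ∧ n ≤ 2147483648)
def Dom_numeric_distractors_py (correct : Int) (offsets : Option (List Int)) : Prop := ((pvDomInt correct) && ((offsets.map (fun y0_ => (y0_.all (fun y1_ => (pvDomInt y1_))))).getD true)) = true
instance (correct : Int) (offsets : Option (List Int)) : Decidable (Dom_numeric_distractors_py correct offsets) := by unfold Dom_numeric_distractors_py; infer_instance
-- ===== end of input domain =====

-- B works on the offsets themselves instead of the candidate values: dedup the
-- non-zero offsets once, build the top-up values by filtering a bounded range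
-- instead of a while loop, then truncate and stringify in one final map: simpler.

-- ===== PORT A =====
-- A's `for o in offsets` loop (appends every distinct non-correct value, no break)
def pvLoopA (correct : Int) (cands : List Int) : List Int → List Int
  | [] => cands
  | o :: rest =>
    let v := correct + o
    if v ≠ correct ∧ v ∉ cands then pvLoopA correct (cands ++ [v]) rest
    else pvLoopA correct cands rest

-- A's `while len(candidates) < 4` top-up loop, ported with a fuel guard that only
-- makes it total (the loop runs at most 4 + 3 iterations: each one either appends,
-- from length < 4, or hits one of the ≤ 3 stored candidates; values never repeat).
def pvFillA (correct : Int) (cands : List Int) (extra : Int) : Nat → List Int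
  | 0 => cands
  | fuel+1 =>
    if cands.length < 4 then
      let extra' := extra + 1
      let v := correct + extra'
      if v ≠ correct ∧ v ∉ cands then pvFillA correct (cands ++ [v]) extra' fuel
      else pvFillA correct cands extra' fuel
    else cands

def numeric_distractors_py (correct : Int) (offsets : Option (List Int)) : List String :=
  let offs := offsets.getD [-2, -1, 1, 2]
  let candidates := pvLoopA correct [] offs
  let candidates := pvFillA correct candidates 3 8
  (candidates.take 4).map PySem.Int.toStr

-- ===== PORT B =====
-- Source B: kept = list(dict.fromkeys(o for o in offsets if o != 0));
--       fill = [x for x in range(4, 8 + len(kept)) if x not in kept];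
--       return [str(correct + o) for o in (kept + fill)[:4]]
def numeric_distractors_py_alt (correct : Int) (offsets : Option (List Int)) : List String :=
  let offs := offsets.getD [-2, -1, 1, 2]
  let kept := PySem.List.dedup (offs.filter (fun o => decide (o ≠ 0)))
  let fill := (PySem.List.pyRange 4 (8 + (kept.length : Int)) 1).filter (fun x => decide (x ∉ kept))
  ((kept ++ fill).take 4).map (fun o => PySem.Int.toStr (correct + o))

-- ===== PRECONDITION & SPEC =====
def Spec_numeric_distractors_py (correct : Int) (offsets : Option (List Int)) (out : List String) : Prop := out = numeric_distractors_py_alt correct offsets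
instance (correct : Int) (offsets : Option (List Int)) (out : List String) : Decidable (Spec_numeric_distractors_py correct offsets out) := by unfold Spec_numeric_distractors_py; infer_instance

-- ===== CLAIM =====
def Claim_equal_numeric_distractors_py : Prop := ∀ (correct : Int) (offsets : Option (List Int)), Dom_numeric_distractors_py correct offsets → Spec_numeric_distractors_py correct offsets (numeric_distractors_py correct offsets)

-- ===== LEMMAS AND PROOFS =====

-- A's offsets loop, abstracted to the offsets (A stores correct + o; the map is injective)
def pvLoopO (ks : List Int) : List Int → List Int
  | [] => ks
  | o :: rest => if o ≠ 0 ∧ o ∉ ks then pvLoopO (ks ++ [o]) rest else pvLoopO ks rest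

-- A's top-up loop, abstracted to the offsets
def pvFillO (ks : List Int) (x : Int) : Nat → List Int
  | 0 => ks
  | fuel+1 =>
    if ks.length < 4 then
      let x' := x + 1
      if x' ≠ 0 ∧ x' ∉ ks then pvFillO (ks ++ [x']) x' fuel
      else pvFillO ks x' fuel
    else ks

theorem pvLoopA_eq_map (correct : Int) (offs : List Int) : ∀ ks : List Int,
    pvLoopA correct (ks.map (fun k => correct + k)) offs
      = (pvLoopO ks offs).map (fun k => correct + k) := by
  induction offs with
  | nil => intro ks; rfl
  | cons o rest ih =>
    intro ks
    simp only [pvLoopA, pvLoopO]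
    have hmem : (correct + o ∈ ks.map (fun k => correct + k)) ↔ o ∈ ks := by simp
    have hne : (correct + o ≠ correct) ↔ o ≠ 0 := by omega
    by_cases h : o ≠ 0 ∧ o ∉ ks
    · rw [if_pos (by rw [hne, hmem]; exact h), if_pos h]
      have : ks.map (fun k => correct + k) ++ [correct + o]
          = (ks ++ [o]).map (fun k => correct + k) := by simp
      rw [this, ih]
    · rw [if_neg (by rw [hne, hmem]; exact h), if_neg h]
      exact ih ks

theorem pvFillA_eq_map (correct : Int) (fuel : Nat) : ∀ (ks : List Int) (x : Int),
    pvFillA correct (ks.map (fun k => correct + k)) x fuel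
      = (pvFillO ks x fuel).map (fun k => correct + k) := by
  induction fuel with
  | zero => intro ks x; rfl
  | succ fuel ih =>
    intro ks x
    simp only [pvFillA, pvFillO, List.length_map]
    by_cases h4 : ks.length < 4
    · rw [if_pos h4, if_pos h4]
      have hmem : (correct + (x + 1) ∈ ks.map (fun k => correct + k)) ↔ x + 1 ∈ ks := by simp
      have hne : (correct + (x + 1) ≠ correct) ↔ x + 1 ≠ 0 := by omega
      by_cases h : x + 1 ≠ 0 ∧ x + 1 ∉ ks
      · rw [if_pos (by rw [hne, hmem]; exact h), if_pos h]
        have : ks.map (fun k => correct + k) ++ [correct + (x + 1)]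
            = (ks ++ [x + 1]).map (fun k => correct + k) := by simp
        rw [this, ih]
      · rw [if_neg (by rw [hne, hmem]; exact h), if_neg h]
        exact ih ks (x + 1)
    · rw [if_neg h4, if_neg h4]

-- pvLoopO is Source B's dict.fromkeys over the non-zero offsets (PySem.Set.ofList = foldl add)
theorem pvLoopO_eq_foldl (offs : List Int) : ∀ ks : List Int,
    pvLoopO ks offs = (offs.filter (fun o => decide (o ≠ 0))).foldl PySem.Set.add ks := by
  induction offs with
  | nil => intro ks; rfl
  | cons o rest ih =>
    intro ks
    simp only [pvLoopO]
    by_cases h0 : o = 0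
    · rw [List.filter_cons_of_neg (by simp [h0]), if_neg (by simp [h0])]
      exact ih ks
    · rw [List.filter_cons_of_pos (by simp [h0]), List.foldl_cons]
      by_cases hm : o ∈ ks
      · rw [if_neg (fun h => h.2 hm), ih,
          show PySem.Set.add ks o = ks by simp [PySem.Set.add, hm]]
      · rw [if_pos ⟨h0, hm⟩, ih,
          show PySem.Set.add ks o = ks ++ [o] by simp [PySem.Set.add, hm]]

-- once 4 candidates are present, the top-up loop does nothing
theorem pvFillO_noop (ks : List Int) (x : Int) (fuel : Nat) (h : 4 ≤ ks.length) :
    pvFillO ks x fuel = ks := by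
  cases fuel with
  | zero => rfl
  | succ fuel => simp [pvFillO, Nat.not_lt.mpr h]

-- the top-up loop started at counter x = the filtered range (x+1, x+1+n), truncated
theorem pvFillO_eq_range (n : Nat) : ∀ (fuel : Nat) (ks : List Int) (x : Int),
    n ≤ fuel → 0 ≤ x → ks.length < 4 →
    4 - ks.length ≤ ((PySem.List.pyRange (x+1) (x+1+(n:Int)) 1).filter (fun y => decide (y ∉ ks))).length →
    pvFillO ks x fuel
      = ks ++ ((PySem.List.pyRange (x+1) (x+1+(n:Int)) 1).filter (fun y => decide (y ∉ ks))).take (4 - ks.length) := by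
  induction n with
  | zero =>
    intro fuel ks x _ _ h4 hlen
    rw [PySem.List.pyRange_one_eq_nil (by omega)] at hlen
    simp at hlen
    omega
  | succ n ih =>
    intro fuel ks x hfuel hx h4 hlen
    cases fuel with
    | zero => omega
    | succ fuel =>
      have hcons : PySem.List.pyRange (x+1) (x+1+((n+1 : Nat) : Int)) 1
          = (x+1) :: PySem.List.pyRange ((x+1)+1) ((x+1)+1+(n:Int)) 1 := by
        rw [PySem.List.pyRange_one_cons (by push_cast; omega)]
        congr 1
        push_cast
        ring_nf
      rw [hcons] at hlen ⊢
      simp only [pvFillO, if_pos h4]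
      by_cases hm : x + 1 ∈ ks
      · rw [if_neg (by simp [hm])]
        rw [List.filter_cons_of_neg (by simp [hm])] at hlen ⊢
        exact ih fuel ks (x+1) (by omega) (by omega) h4 hlen
      · rw [if_pos ⟨by omega, hm⟩]
        rw [List.filter_cons_of_pos (by simp [hm])] at hlen ⊢
        have htk : 0 < 4 - ks.length := by omega
        obtain ⟨m, hm4⟩ : ∃ m, 4 - ks.length = m + 1 := ⟨4 - ks.length - 1, by omega⟩
        rw [hm4, List.take_succ_cons]
        have hlen' : (ks ++ [x+1]).length = ks.length + 1 := by simp
        -- the tail range lies strictly above x+1, so membership in ks++[x+1] = membership in ks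
        have hcong : (PySem.List.pyRange ((x+1)+1) ((x+1)+1+(n:Int)) 1).filter (fun y => decide (y ∉ ks ++ [x+1]))
            = (PySem.List.pyRange ((x+1)+1) ((x+1)+1+(n:Int)) 1).filter (fun y => decide (y ∉ ks)) := by
          apply List.filter_congr
          intro y hy
          rw [PySem.List.mem_pyRange_one] at hy
          simp only [decide_eq_decide, List.mem_append, List.mem_singleton]
          constructor
          · intro h hk; exact h (Or.inl hk)
          · intro h hk; rcases hk with hk | hk
            · exact h hk
            · omega
        by_cases h4' : (ks ++ [x+1]).length < 4
        · have := ih fuel (ks ++ [x+1]) (x+1) (by omega) (by omega) h4'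
            (by rw [hcong, hlen']; simp at hlen ⊢; omega)
          rw [this, hcong, hlen']
          have : 4 - (ks.length + 1) = m := by omega
          rw [this, List.append_assoc, List.singleton_append]
        · have hm0 : m = 0 := by simp at h4'; omega
          rw [pvFillO_noop _ _ _ (by simp at h4' ⊢; omega), hm0, List.take_zero]

-- counting: the range 4 .. 8+|kept| keeps at least 4 elements after removing kept's members
theorem range_filter_enough (kept : List Int) (h4 : kept.length < 4) :
    4 - kept.length ≤ ((PySem.List.pyRange 4 (8 + (kept.length : Int)) 1).filter (fun y => decide (y ∉ kept))).length := by
  set R := PySem.List.pyRange 4 (8 + (kept.length : Int)) 1 with hR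
  have hRlen : R.length = 4 + kept.length := by
    rw [hR, PySem.List.length_pyRange_one]; omega
  have hsplit : R.length = (R.filter (fun y => decide (y ∉ kept))).length
      + (R.filter (fun y => !(decide (y ∉ kept)))).length :=
    List.length_eq_length_filter_add (fun y => decide (y ∉ kept))
  have hin : (R.filter (fun y => !(decide (y ∉ kept)))).length ≤ kept.length := by
    have hnodup : (R.filter (fun y => !(decide (y ∉ kept)))).Nodup :=
      (PySem.List.nodup_pyRange_one 4 (8 + (kept.length : Int))).filter _
    have hsub : (R.filter (fun y => !(decide (y ∉ kept)))) ⊆ kept := by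
      intro y hy
      have := List.of_mem_filter hy
      simpa using this
    exact (hnodup.subperm hsub).length_le
  omega

-- ===== VERDICT =====
theorem numeric_distractors_py_spec : Claim_equal_numeric_distractors_py := by
  intro correct offsets _
  unfold Spec_numeric_distractors_py numeric_distractors_py numeric_distractors_py_alt
  dsimp only
  set offs := offsets.getD [-2, -1, 1, 2] with hoffs
  have hloop : pvLoopA correct [] offs = (pvLoopO [] offs).map (fun k => correct + k) := by
    have := pvLoopA_eq_map correct offs []
    simpa using this
  set kept := pvLoopO [] offs with hkept
  have hdedup : PySem.List.dedup (offs.filter (fun o => decide (o ≠ 0))) = kept := by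
    rw [hkept, pvLoopO_eq_foldl]
    rfl
  rw [hloop, hdedup]
  by_cases h4 : 4 ≤ kept.length
  · -- the offsets alone already give ≥ 4 candidates: the while loop is a no-op on both sides
    rw [pvFillA_eq_map, pvFillO_noop kept 3 8 h4,
      List.take_append_of_le_length (by simpa using h4), ← List.map_take, List.map_map]
    rfl
  · have hlt : kept.length < 4 := by omega
    rw [pvFillA_eq_map]
    have henough := range_filter_enough kept hlt
    have hargs : PySem.List.pyRange ((3:Int)+1) ((3:Int)+1+((4 + kept.length : Nat) : Int)) 1
        = PySem.List.pyRange 4 (8 + (kept.length : Int)) 1 := by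
      have h2 : (3:Int)+1+((4 + kept.length : Nat) : Int) = 8 + (kept.length : Int) := by push_cast; ring
      have h1 : (3:Int)+1 = 4 := by norm_num
      rw [h2, h1]
    have hfill := pvFillO_eq_range (4 + kept.length) 8 kept 3 (by omega) (by omega) hlt
      (by rw [hargs]; exact henough)
    rw [hargs] at hfill
    rw [hfill]
    set fl := (PySem.List.pyRange 4 (8 + (kept.length : Int)) 1).filter (fun y => decide (y ∉ kept)) with hfl
    -- both sides are (kept ++ fl.take (4 - |kept|)) mapped; B truncates kept ++ fl at 4
    have hBtake : (kept ++ fl).take 4 = kept ++ fl.take (4 - kept.length) := by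
      rw [List.take_append, List.take_of_length_le (by omega)]
    rw [hBtake]
    have hAlen : (kept ++ fl.take (4 - kept.length)).length = 4 := by
      simp only [List.length_append, List.length_take]
      omega
    rw [← List.map_take, List.take_of_length_le (by rw [hAlen]), List.map_map]
    rfl
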